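-- pv_equiv track=rewrite | github.com/menacepicks/mlb | mlb_betting_data/data/retrosheet_parser.py | _iter_games_from_event_lines
-- ===== SOURCE A (Python) =====
-- def _iter_games_from_event_lines(lines: list[str]) -> list[list[str]]:
--     games: list[list[str]] = []
--     current: list[str] = []
--     for line in lines:
--         if line.startswith("id,"):
--             if current:
--                 games.append(current)
--             current = [line]
--         elif current:
--             current.append(line)
--     if current:
--         games.append(current)
--     return games
-- ===== SOURCE B (Python) =====
-- def _iter_games_from_event_lines(lines: list[str]) -> list[list[str]]:
--     games: list[list[str]] = []
--     n = len(lines)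
--     i = 0
--     # skip leading lines before the first game boundary
--     while i < n and not lines[i].startswith("id,"):
--         i += 1
--     # each game runs from one "id," line up to (not including) the next
--     while i < n:
--         j = i + 1
--         while j < n and not lines[j].startswith("id,"):
--             j += 1
--         games.append(lines[i:j])
--         i = j
--     return games
-- ===== Notes on version B (the rewrite author's own statement) =====
-- stated objective: alternative
-- what changed: Replaced the single accumulator loop (games list plus a mutable current buffer flushed at each boundary and at the end) by two-pointer index scanning: skip to the first 'id,' line, then repeatedly find the next boundary and slice out lines[i:j].
import Mathlib
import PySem

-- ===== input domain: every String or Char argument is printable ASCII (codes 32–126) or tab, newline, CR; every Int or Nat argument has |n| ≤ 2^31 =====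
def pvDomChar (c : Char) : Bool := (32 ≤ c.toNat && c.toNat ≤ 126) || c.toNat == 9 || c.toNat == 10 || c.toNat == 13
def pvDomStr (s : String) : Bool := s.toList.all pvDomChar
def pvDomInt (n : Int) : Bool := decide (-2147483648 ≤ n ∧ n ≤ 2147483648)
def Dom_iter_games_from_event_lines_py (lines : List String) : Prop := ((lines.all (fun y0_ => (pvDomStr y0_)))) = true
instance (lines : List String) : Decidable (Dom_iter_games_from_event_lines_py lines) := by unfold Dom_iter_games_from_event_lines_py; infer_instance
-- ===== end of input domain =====

-- ===== PORT A =====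
-- B replaces A's accumulator loop by two-pointer scanning (takeWhile/dropWhile to the next boundary); same O(n) cost, different decomposition.
def pvIsId (l : String) : Bool := PySem.Str.startswith l "id,"

def iter_games_from_event_lines_py (lines : List String) : List (List String) :=
  let s := lines.foldl
    (fun (st : List (List String) × List String) line =>
      if pvIsId line then
        (if st.2 ≠ [] then st.1 ++ [st.2] else st.1, [line])
      else if st.2 ≠ [] then
        (st.1, st.2 ++ [line])
      else st)
    ([], [])
  if s.2 ≠ [] then s.1 ++ [s.2] else s.1

-- ===== PORT B =====
-- inner while loop: collect up to the next "id," line, recurse on the remainder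
def pvAltGo : List String → List (List String)
  | [] => []
  | l :: rest =>
    (l :: rest.takeWhile (fun x => !pvIsId x)) :: pvAltGo (rest.dropWhile (fun x => !pvIsId x))
termination_by l => l.length
decreasing_by
  exact Nat.lt_succ_of_le (List.length_dropWhile_le _ _)

def iter_games_from_event_lines_py_alt (lines : List String) : List (List String) :=
  pvAltGo (lines.dropWhile (fun x => !pvIsId x))

-- ===== PRECONDITION & SPEC =====
def Spec_iter_games_from_event_lines_py (lines : List String) (out : List (List String)) : Prop := out = iter_games_from_event_lines_py_alt lines
instance (lines : List String) (out : List (List String)) : Decidable (Spec_iter_games_from_event_lines_py lines out) := by unfold Spec_iter_games_from_event_lines_py; infer_instance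

-- ===== CLAIM (what is proved, stated in full; the proofs are below) =====
def Claim_equal_iter_games_from_event_lines_py : Prop := ∀ (lines : List String), Dom_iter_games_from_event_lines_py lines → Spec_iter_games_from_event_lines_py lines (iter_games_from_event_lines_py lines)

-- ===== LEMMAS AND PROOFS =====
def pvStep (st : List (List String) × List String) (line : String) : List (List String) × List String :=
  if pvIsId line then
    (if st.2 ≠ [] then st.1 ++ [st.2] else st.1, [line])
  else if st.2 ≠ [] then
    (st.1, st.2 ++ [line])
  else st

lemma pvAltGo_nil : pvAltGo [] = [] := by rw [pvAltGo]

lemma pvAltGo_cons (l : String) (rest : List String) :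
    pvAltGo (l :: rest) =
      (l :: rest.takeWhile (fun x => !pvIsId x)) ::
        pvAltGo (rest.dropWhile (fun x => !pvIsId x)) := by rw [pvAltGo]

def pvFinish (s : List (List String) × List String) : List (List String) :=
  if s.2 ≠ [] then s.1 ++ [s.2] else s.1

lemma pv_nonempty (g : List (List String)) (c : List String) (hc : c ≠ [])
    (lines : List String) :
    pvFinish (lines.foldl pvStep (g, c)) =
      g ++ ((c ++ lines.takeWhile (fun x => !pvIsId x)) ::
            pvAltGo (lines.dropWhile (fun x => !pvIsId x))) := by
  induction lines generalizing g c with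
  | nil => simp [pvFinish, hc, pvAltGo_nil]
  | cons l rest ih =>
    by_cases h : pvIsId l
    · have hs : pvStep (g, c) l = (g ++ [c], [l]) := by simp [pvStep, h, hc]
      rw [List.foldl_cons, hs, ih (g ++ [c]) [l] (by simp)]
      simp [h, pvAltGo_cons]
    · have hs : pvStep (g, c) l = (g, c ++ [l]) := by simp [pvStep, h, hc]
      rw [List.foldl_cons, hs, ih g (c ++ [l]) (by simp)]
      simp [h]

lemma pv_empty (g : List (List String)) (lines : List String) :
    pvFinish (lines.foldl pvStep (g, [])) =
      g ++ pvAltGo (lines.dropWhile (fun x => !pvIsId x)) := by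
  induction lines generalizing g with
  | nil => simp [pvFinish, pvAltGo_nil]
  | cons l rest ih =>
    by_cases h : pvIsId l
    · have hs : pvStep (g, []) l = (g, [l]) := by simp [pvStep, h]
      rw [List.foldl_cons, hs, pv_nonempty g [l] (by simp) rest]
      simp [h, pvAltGo_cons]
    · have hs : pvStep (g, []) l = (g, []) := by simp [pvStep, h]
      rw [List.foldl_cons, hs, ih g]
      simp [h]

-- ===== VERDICT (by name: the statement is the Claim_ definition above) =====
theorem iter_games_from_event_lines_py_spec : Claim_equal_iter_games_from_event_lines_py := by
  intro lines _
  show iter_games_from_event_lines_py lines = iter_games_from_event_lines_py_alt lines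
  have h : iter_games_from_event_lines_py lines = pvFinish (lines.foldl pvStep ([], [])) := rfl
  rw [h, pv_empty]
  rfl
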